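-- pv_equiv track=rewrite | github.com/gabao55/Algorithms-and-Computer-Programming-UNICAMP | lab 10.py | desenho
-- ===== SOURCE A (Python) =====
-- def desenho(lista):
--     maximo = 0
--     meio_desenho = ''
--     lista_desenho = lista.copy()
--     for i in lista_desenho:
--         j = int(i)
--         if j > maximo:
--             maximo = j
--     while maximo != 0:
--         contador = -1
--         linha = []
--         linha.append('.')
--         for i in lista_desenho:
--             j = int(i)
--             contador += 1
--             if j != maximo:
--                 linha.append(' ')
--             else:
--                 linha.append('|')
--                 lista_desenho[contador] = j -1
--         linha.append('.')
--         a = ''.join(linha)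
--         maximo -= 1
--         meio_desenho += a
--         meio_desenho += '\n'
--     return((len(lista) + 2) * '.'+ '\n' + meio_desenho + (len(lista) + 2) * '.')
-- ===== SOURCE B (Python) =====
-- def desenho(lista):
--     values = [int(i) for i in lista]
--     M = max((v for v in values if v > 0), default=0)
--     bars = [''.join('|' if v >= L else ' ' for L in range(M, 0, -1)) for v in values]
--     rows = ['.' + ''.join(r) + '.' for r in zip(*bars)]
--     border = '.' * (len(lista) + 2)
--     return '\n'.join([border] + rows + [border])
-- ===== Notes on version B (the rewrite author's own statement) =====
-- stated objective: alternative
-- what changed: B computes the max level once, builds each column's bar string top-to-bottom ('|' iff value >= level) and transposes with zip(*bars), then joins with '\n' - replacing A's while-loop that rescans and destructively decrements the list once per level.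
import Mathlib
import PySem

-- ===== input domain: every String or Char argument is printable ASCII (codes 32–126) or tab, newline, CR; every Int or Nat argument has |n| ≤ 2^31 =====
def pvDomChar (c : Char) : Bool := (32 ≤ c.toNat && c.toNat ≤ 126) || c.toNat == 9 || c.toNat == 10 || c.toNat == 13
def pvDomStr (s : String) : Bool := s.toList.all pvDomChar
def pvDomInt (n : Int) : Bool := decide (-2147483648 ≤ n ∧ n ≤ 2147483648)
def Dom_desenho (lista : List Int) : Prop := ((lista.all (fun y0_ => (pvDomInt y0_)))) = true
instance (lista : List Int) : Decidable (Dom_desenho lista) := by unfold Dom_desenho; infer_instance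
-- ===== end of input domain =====

-- B builds the chart column-first and transposes (different decomposition than A's
-- row-by-row decrement scan); objective: alternative, same asymptotic cost.

-- ===== PORT A =====
-- inner `for i in lista_desenho` of the while body: builds the row characters and the
-- updated list (Python mutates lista_desenho[contador] of the element just visited,
-- which never affects the remaining iteration, so this recursion is exact)
def desenhoRowA (maximo : Int) : List Int → List Char × List Int
  | [] => ([], [])
  | j :: rest =>
      let p := desenhoRowA maximo rest
      if j ≠ maximo then (' ' :: p.1, j :: p.2)
      else ('|' :: p.1, (j - 1) :: p.2)

-- `while maximo != 0`: maximo starts ≥ 0 and drops by exactly 1 each pass, so the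
-- loop is structural recursion on maximo.toNat
def desenhoLoopA : Nat → List Int → List Char → List Char
  | 0, _, meio => meio
  | n + 1, ld, meio =>
      let p := desenhoRowA ((n : Int) + 1) ld
      desenhoLoopA n p.2 (meio ++ ('.' :: p.1 ++ ['.', '\n']))

def desenho (lista : List Int) : String :=
  let maximo := lista.foldl (fun m j => if j > m then j else m) 0
  let meio := desenhoLoopA maximo.toNat lista []
  String.mk (List.replicate (lista.length + 2) '.' ++ '\n' :: meio ++ List.replicate (lista.length + 2) '.')

-- ===== PORT B =====
-- hand port of Python's zip(*bars): take heads while every list is nonempty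
def pyZipChars (ls : List (List Char)) : List (List Char) :=
  if h : ls = [] ∨ [] ∈ ls then []
  else (ls.map (fun l => l.headD ' ')) :: pyZipChars (ls.map List.tail)
termination_by (ls.headD []).length
decreasing_by
  push_neg at h
  obtain ⟨h1, h2⟩ := h
  cases ls with
  | nil => exact absurd rfl h1
  | cons a t =>
      simp only [List.map_cons, List.headD_cons]
      have : a ≠ [] := fun hc => h2 (hc ▸ List.mem_cons_self)
      cases a with
      | nil => exact absurd rfl this
      | cons c cs => simp

def desenho_alt (lista : List Int) : String :=
  let values := lista.map (fun i => i)   -- int(i) on an int is the identity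
  let M : Int := match PySem.List.max? (values.filter (fun v => decide (0 < v))) (fun x => x) with
                 | some m => m
                 | none => 0
  let bars := values.map (fun v => (PySem.List.pyRange M 0 (-1)).map (fun L => if v ≥ L then '|' else ' '))
  let rows := (pyZipChars bars).map (fun r => '.' :: r ++ ['.'])
  let border := List.replicate (lista.length + 2) '.'
  String.mk (PySem.Chars.join ['\n'] ([border] ++ rows ++ [border]))

-- ===== PRECONDITION & SPEC =====
def Spec_desenho (lista : List Int) (out : String) : Prop := out = desenho_alt lista
instance (lista : List Int) (out : String) : Decidable (Spec_desenho lista out) := by unfold Spec_desenho; infer_instance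

-- ===== CLAIM (what is proved, stated in full; the proofs are below) =====
def Claim_equal_desenho : Prop := ∀ (lista : List Int), Dom_desenho lista → Spec_desenho lista (desenho lista)

-- ===== LEMMAS AND PROOFS =====

theorem foldl_if_gt_eq_max (l : List Int) (a : Int) :
    l.foldl (fun m j => if j > m then j else m) a = l.foldl max a := by
  induction l generalizing a with
  | nil => rfl
  | cons x t ih =>
      simp only [List.foldl_cons, ih]
      congr 1
      by_cases h : x > a <;> simp [h, max_def] <;> omega

theorem foldl_max_filter_pos (l : List Int) (a : Int) (ha : 0 ≤ a) :
    l.foldl max a = (l.filter (fun v => decide (0 < v))).foldl max a := by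
  induction l generalizing a with
  | nil => rfl
  | cons x t ih =>
      by_cases h : 0 < x
      · simp only [List.foldl_cons, List.filter_cons, h, decide_true, if_true]
        exact ih (max a x) (le_trans ha (le_max_left _ _))
      · have : max a x = a := max_eq_left (by omega)
        simp only [List.foldl_cons, List.filter_cons, h, decide_false, Bool.false_eq_true,
          if_false, this]
        exact ih a ha

theorem le_foldl_max_int (l : List Int) (a : Int) : a ≤ l.foldl max a := by
  induction l generalizing a with
  | nil => exact le_refl a
  | cons x t ih => exact le_trans (le_max_left a x) (ih (max a x))

theorem mem_le_foldl_max_int (l : List Int) (a : Int) (v : Int) (hv : v ∈ l) :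
    v ≤ l.foldl max a := by
  induction l generalizing a with
  | nil => cases hv
  | cons x t ih =>
      rcases List.mem_cons.mp hv with h | h
      · subst h; exact le_trans (le_max_right a v) (le_foldl_max_int t _)
      · exact ih _ h

-- B's max(generator, default=0) equals A's running-max loop
theorem maxB_eq_foldl (l : List Int) :
    (match PySem.List.max? (l.filter (fun v => decide (0 < v))) (fun x => x) with
     | some m => m
     | none => 0) = l.foldl max 0 := by
  rw [foldl_max_filter_pos l 0 (le_refl 0)]
  cases hf : l.filter (fun v => decide (0 < v)) with
  | nil => simp [PySem.List.max?]
  | cons x t =>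
      rw [PySem.List.max?_id_cons]
      have hx : 0 < x := by
        have := List.mem_filter.mp (hf ▸ List.mem_cons_self (l := t))
        simpa using this.2
      simp only [List.foldl_cons]
      have : max 0 x = x := max_eq_right (by omega)
      rw [this]

-- one pass of A's inner for-loop, on a list whose entries are min v M
theorem rowA_eq (n : Nat) (l : List Int) :
    desenhoRowA ((n : Int) + 1) (l.map (fun v => min v ((n : Int) + 1)))
      = (l.map (fun v => if v ≥ (n : Int) + 1 then '|' else ' '),
         l.map (fun v => min v (n : Int))) := by
  induction l with
  | nil => rfl
  | cons x t ih =>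
      simp only [List.map_cons, desenhoRowA, ih]
      by_cases h : x ≥ (n : Int) + 1
      · have h1 : min x ((n : Int) + 1) = (n : Int) + 1 := min_eq_right (by omega)
        have h2 : min x (n : Int) = (n : Int) := min_eq_right (by omega)
        simp [h, h1, h2]
      · have h1 : min x ((n : Int) + 1) = x := min_eq_left (by omega)
        have h2 : min x (n : Int) = x := min_eq_left (by omega)
        have h3 : x ≠ (n : Int) + 1 := by omega
        simp [h, h1, h2, h3]

-- A's middle block as a function of the ORIGINAL values: rows for levels n, n-1, …, 1
def middleC : Nat → List Int → List Char
  | 0, _ => []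
  | n + 1, l =>
      ('.' :: l.map (fun v => if v ≥ (n : Int) + 1 then '|' else ' ') ++ ['.', '\n'])
        ++ middleC n l

theorem loopA_eq (n : Nat) (l : List Int) (meio : List Char) :
    desenhoLoopA n (l.map (fun v => min v (n : Int))) meio = meio ++ middleC n l := by
  induction n generalizing meio with
  | zero => simp [desenhoLoopA, middleC]
  | succ n ih =>
      have : ((n : Int) + 1) = ((n + 1 : Nat) : Int) := by push_cast; ring
      simp only [desenhoLoopA, ← this, rowA_eq n l, middleC, ih]
      simp

-- Python's zip(*bars) on columns generated from the same level list transposes them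
theorem pyZip_map_map {α : Type} (g : Int → α → Char) (ks : List α) (l : List Int)
    (hne : ks ≠ [] → l ≠ []) :
    pyZipChars (l.map (fun v => ks.map (fun L => g v L)))
      = ks.map (fun L => l.map (fun v => g v L)) := by
  induction ks generalizing l with
  | nil =>
      cases l with
      | nil => rw [pyZipChars]; simp
      | cons x t =>
          rw [pyZipChars]
          simp
  | cons k kt ih =>
      have hl : l ≠ [] := hne (by simp)
      rw [pyZipChars]
      have hnil : ¬ (l.map (fun v => (k :: kt).map (fun L => g v L)) = []
          ∨ [] ∈ l.map (fun v => (k :: kt).map (fun L => g v L))) := by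
        simp [hl]
      rw [dif_neg hnil, List.map_map, List.map_map]
      have h1 : ((fun t => t.headD ' ') ∘ fun v => (k :: kt).map (fun L => g v L))
          = fun v => g v k := by funext v; simp
      have h2 : (List.tail ∘ fun v => (k :: kt).map (fun L => g v L))
          = fun v => kt.map (fun L => g v L) := by funext v; simp
      rw [h1, h2, ih l (fun _ => hl)]
      simp

-- '\n'.join(rows ++ [border]) unrolled
theorem joinNL (rs : List (List Char)) (b : List Char) :
    PySem.Chars.join ['\n'] (rs ++ [b])
      = rs.foldr (fun r acc => r ++ '\n' :: acc) b := by
  induction rs with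
  | nil => simp [PySem.Chars.join_singleton]
  | cons r rt ih =>
      cases h : rt ++ [b] with
      | nil => exact absurd h (by simp)
      | cons c ct =>
          have : (r :: rt) ++ [b] = r :: c :: ct := by simp [h]
          rw [this, PySem.Chars.join_cons_cons, ← h, ih]
          simp

-- the middle block matches B's transposed rows
theorem middle_eq_foldr (n : Nat) (l : List Int) (b : List Char) :
    ((PySem.List.pyRange ((n : Int)) 0 (-1)).map
        (fun L => '.' :: l.map (fun v => if v ≥ L then '|' else ' ') ++ ['.'])).foldr
      (fun r acc => r ++ '\n' :: acc) b
      = middleC n l ++ b := by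
  induction n with
  | zero => simp [PySem.List.pyRange_neg_one_eq_nil, middleC]
  | succ n ih =>
      have h1 : ((n + 1 : Nat) : Int) - 1 = (n : Int) := by push_cast; ring
      have h2 : ((n + 1 : Nat) : Int) = (n : Int) + 1 := by push_cast; ring
      rw [PySem.List.pyRange_neg_one_cons (by exact_mod_cast Nat.succ_pos n), h1]
      simp only [List.map_cons, List.foldr_cons, ih, middleC, h2]
      simp [List.append_assoc]

theorem join_head (b x : List Char) (rs : List (List Char)) :
    PySem.Chars.join ['\n'] (b :: (rs ++ [x]))
      = b ++ '\n' :: PySem.Chars.join ['\n'] (rs ++ [x]) := by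
  cases rs with
  | nil => simp only [List.nil_append]; rw [PySem.Chars.join_cons_cons]; simp
  | cons c t => rw [List.cons_append, PySem.Chars.join_cons_cons]; simp

-- ===== VERDICT (by name: the statement is the Claim_ definition above) =====
theorem desenho_spec : Claim_equal_desenho := by
  intro lista _
  show desenho lista = desenho_alt lista
  unfold desenho desenho_alt
  simp only [List.map_id_fun', id, maxB_eq_foldl, foldl_if_gt_eq_max]
  set M : Int := lista.foldl max 0 with hM
  have hM0 : 0 ≤ M := le_foldl_max_int lista 0
  have hMle : ∀ v ∈ lista, v ≤ M := fun v hv => mem_le_foldl_max_int lista 0 v hv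
  have hMcast : ((M.toNat : Nat) : Int) = M := Int.toNat_of_nonneg hM0
  have hfix : lista.map (fun v => min v ((M.toNat : Nat) : Int)) = lista := by
    rw [hMcast]
    conv_rhs => rw [← List.map_id lista]
    exact List.map_congr_left (fun v hv => min_eq_left (hMle v hv))
  have hloop := loopA_eq M.toNat lista []
  rw [hfix] at hloop
  rw [hloop]
  -- B side
  have hzip : pyZipChars (lista.map (fun v =>
        (PySem.List.pyRange M 0 (-1)).map (fun L => if v ≥ L then '|' else ' ')))
      = (PySem.List.pyRange M 0 (-1)).map
          (fun L => lista.map (fun v => if v ≥ L then '|' else ' ')) := by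
    apply pyZip_map_map (g := fun v L => if v ≥ L then '|' else ' ')
    intro hks hl
    -- a nonempty level list forces a positive max, hence a nonempty input
    apply hks
    have : M = 0 := by
      subst hl
      simp [hM]
    rw [this]
    exact PySem.List.pyRange_neg_one_eq_nil (by omega)
  rw [hzip]
  refine congrArg String.mk ?_
  rw [List.singleton_append, List.cons_append, join_head, joinNL, List.map_map]
  have hms := middle_eq_foldr M.toNat lista (List.replicate (lista.length + 2) '.')
  rw [hMcast] at hms
  have hcomp : ((fun r => '.' :: r ++ ['.']) ∘ fun L => lista.map (fun v => if v ≥ L then '|' else ' '))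
      = fun L => '.' :: lista.map (fun v => if v ≥ L then '|' else ' ') ++ ['.'] := by
    funext L; simp
  rw [hcomp, hms]
  simp
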